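-- pv_equiv track=rewrite | github.com/miczho/competitive-coding | atcoder-zone2021-d.py | msgFromAliens
-- ===== SOURCE A (Python) =====
-- from collections import deque
--
-- def msgFromAliens(s):
--     n, flip = len(s), 0
--     ans = deque()
--     for ch in s:
--         if ch == 'R':
--             flip ^= 1
--             continue
--         if flip:
--             if ans and ch == ans[0]:
--                 ans.popleft()
--             else:
--                 ans.appendleft(ch)
--         else:
--             if ans and ch == ans[-1]:
--                 ans.pop()
--             else:
--                 ans.append(ch)
--
--     if flip:
--         ans.reverse()
--
--     return ''.join(ans)
-- ===== SOURCE B (Python) =====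
-- def msgFromAliens(s):
--     ans = []
--     for ch in s:
--         if ch == 'R':
--             ans.reverse()
--         elif ans and ch == ans[-1]:
--             ans.pop()
--         else:
--             ans.append(ch)
--     return ''.join(ans)
-- ===== Notes on version B (the rewrite author's own statement) =====
-- stated objective: simpler
-- what changed: Replaces the lazy flip-bit with dual front/back deque editing and a deferred final reverse by a plain list kept in display orientation: each 'R' eagerly reverses the list and all edits happen at the back only.
import Mathlib
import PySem

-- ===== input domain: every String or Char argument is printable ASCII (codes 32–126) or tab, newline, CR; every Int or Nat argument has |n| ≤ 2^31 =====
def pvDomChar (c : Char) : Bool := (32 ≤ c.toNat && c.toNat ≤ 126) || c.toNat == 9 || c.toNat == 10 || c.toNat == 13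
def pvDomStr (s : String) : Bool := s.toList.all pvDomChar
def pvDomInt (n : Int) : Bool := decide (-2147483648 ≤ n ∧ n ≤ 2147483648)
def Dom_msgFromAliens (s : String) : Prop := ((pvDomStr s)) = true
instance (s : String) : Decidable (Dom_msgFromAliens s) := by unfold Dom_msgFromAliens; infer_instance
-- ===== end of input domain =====

-- B replaces A's flip-bit + dual-ended deque editing + deferred final reverse by a single
-- list kept in display orientation, eagerly reversed on each 'R' (objective: simpler).

-- ===== PORT A =====
-- A's deque is modelled as a List Char in front-to-back order; state = (flip, ans).
def msgFromAliensStepA (st : Bool × List Char) (ch : Char) : Bool × List Char :=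
  if ch = 'R' then (!st.1, st.2)
  else if st.1 then
    -- flip set: edit at the front (popleft / appendleft)
    if st.2.head? = some ch then (st.1, st.2.tail) else (st.1, ch :: st.2)
  else
    -- flip clear: edit at the back (pop / append)
    if st.2.getLast? = some ch then (st.1, st.2.dropLast) else (st.1, st.2 ++ [ch])

def msgFromAliens (s : String) : String :=
  let st := s.toList.foldl msgFromAliensStepA (false, [])
  String.mk (if st.1 then st.2.reverse else st.2)

-- ===== PORT B =====
def msgFromAliensStepB (ans : List Char) (ch : Char) : List Char :=
  if ch = 'R' then ans.reverse
  else if ans.getLast? = some ch then ans.dropLast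
  else ans ++ [ch]

def msgFromAliens_alt (s : String) : String :=
  String.mk (s.toList.foldl msgFromAliensStepB [])

-- ===== PRECONDITION & SPEC =====
def Spec_msgFromAliens (s : String) (out : String) : Prop := out = msgFromAliens_alt s
instance (s : String) (out : String) : Decidable (Spec_msgFromAliens s out) := by unfold Spec_msgFromAliens; infer_instance

-- ===== CLAIM (what is proved, stated in full; the proofs are below) =====
def Claim_equal_msgFromAliens : Prop := ∀ (s : String), Dom_msgFromAliens s → Spec_msgFromAliens s (msgFromAliens s)

-- ===== LEMMAS AND PROOFS =====

-- One step preserves the invariant: B's list is A's deque viewed in display orientation.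
theorem msgFromAliens_step (flip : Bool) (ans : List Char) (ch : Char) :
    msgFromAliensStepB (if flip then ans.reverse else ans) ch =
      (let st := msgFromAliensStepA (flip, ans) ch
       if st.1 then st.2.reverse else st.2) := by
  unfold msgFromAliensStepA msgFromAliensStepB
  by_cases hR : ch = 'R'
  · cases flip <;> simp [hR]
  · cases flip with
    | false => simp only [if_neg hR, Bool.false_eq_true, if_false]; split <;> rfl
    | true =>
      simp only [if_pos rfl, if_neg hR, Bool.not_eq_true]
      cases ans with
      | nil => simp
      | cons a t =>
        by_cases h : a = ch
        · subst h
          simp [List.getLast?_reverse]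
        · have : (t.reverse ++ [a]).getLast? = some a := by simp
          simp [List.getLast?_reverse, h]

theorem msgFromAliens_fold (l : List Char) (flip : Bool) (ans : List Char) :
    l.foldl msgFromAliensStepB (if flip then ans.reverse else ans) =
      (let st := l.foldl msgFromAliensStepA (flip, ans)
       if st.1 then st.2.reverse else st.2) := by
  induction l generalizing flip ans with
  | nil => simp
  | cons c l ih =>
    simp only [List.foldl_cons]
    rw [msgFromAliens_step]
    have := ih (msgFromAliensStepA (flip, ans) c).1 (msgFromAliensStepA (flip, ans) c).2
    simpa using this

-- ===== VERDICT (by name: the statement is the Claim_ definition above) =====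
theorem msgFromAliens_spec : Claim_equal_msgFromAliens := by
  intro s _
  unfold Spec_msgFromAliens msgFromAliens msgFromAliens_alt
  have h := msgFromAliens_fold s.toList false []
  simp only [if_neg (Bool.false_ne_true), List.reverse_nil] at h
  exact congrArg String.mk h.symm
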